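-- pv_equiv track=rewrite | github.com/siterepository/NEW-Lead-Gen | src/leadgen/agents/content/reddit_fire_utah.py | _is_utah_fire_relevant
-- ===== SOURCE A (Python) =====
-- def _is_utah_fire_relevant(post: dict) -> bool:
--     """Check if a post is from a Utah user discussing FIRE/finance."""
--     text = (
--         f"{post.get('title', '')} {post.get('selftext', '')}"
--     ).lower()
--
--     utah_indicators = [
--         "utah", "salt lake", "slc", "provo", "ogden", "orem",
--         "sandy", "west jordan", "layton", "lehi", "st. george",
--         "st george", "logan", "bountiful", "draper", "murray",
--         "utah county", "davis county", "weber county",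
--     ]
--     return any(loc in text for loc in utah_indicators)
-- ===== SOURCE B (Python) =====
-- _UTAH_BY_FIRST = {
--     "u": ("tah", "tah county"),
--     "s": ("alt lake", "lc", "andy", "t. george", "t george"),
--     "p": ("rovo",),
--     "o": ("gden", "rem"),
--     "w": ("est jordan", "eber county"),
--     "l": ("ayton", "ehi", "ogan"),
--     "b": ("ountiful",),
--     "d": ("raper", "avis county"),
--     "m": ("urray",),
-- }
--
--
-- def _is_utah_fire_relevant(post: dict) -> bool:
--     """Check if a post is from a Utah user discussing FIRE/finance.
--
--     Single indexed pass with first-character dispatch: walk the text once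
--     and at each position consult a table keyed by the current character,
--     testing only the indicators that could start there.
--     """
--     text = f"{post.get('title', '')} {post.get('selftext', '')}".lower()
--     for i, ch in enumerate(text):
--         for rest in _UTAH_BY_FIRST.get(ch, ()):
--             if text.startswith(rest, i + 1):
--                 return True
--     return False
-- ===== Notes on version B (the rewrite author's own statement) =====
-- stated objective: alternative
-- what changed: Replaced the pattern-major loop (one full substring scan of the text per indicator) by a single indexed pass over the text that dispatches through a table keyed by the first character, testing at each position only the indicator tails that could start there.
import Mathlib
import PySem

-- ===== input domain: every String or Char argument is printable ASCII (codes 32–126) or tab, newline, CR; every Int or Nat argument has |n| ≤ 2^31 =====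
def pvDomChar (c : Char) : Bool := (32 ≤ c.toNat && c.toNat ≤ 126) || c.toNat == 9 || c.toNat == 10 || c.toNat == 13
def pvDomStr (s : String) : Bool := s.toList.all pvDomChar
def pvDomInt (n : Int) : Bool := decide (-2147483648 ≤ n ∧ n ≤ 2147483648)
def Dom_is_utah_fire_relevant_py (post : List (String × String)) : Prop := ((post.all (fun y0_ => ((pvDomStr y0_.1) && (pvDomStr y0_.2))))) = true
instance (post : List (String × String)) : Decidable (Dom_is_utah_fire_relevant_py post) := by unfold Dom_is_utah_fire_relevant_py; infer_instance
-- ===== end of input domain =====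

-- B replaces A's per-indicator substring scans by one indexed pass with a first-character
-- dispatch table; objective: alternative traversal, same result.

-- ===== PORT A =====
-- A's literal list of indicators
def utahIndicators : List (List Char) :=
  ["utah".toList, "salt lake".toList, "slc".toList, "provo".toList, "ogden".toList, "orem".toList,
   "sandy".toList, "west jordan".toList, "layton".toList, "lehi".toList, "st. george".toList,
   "st george".toList, "logan".toList, "bountiful".toList, "draper".toList, "murray".toList,
   "utah county".toList, "davis county".toList, "weber county".toList]

def is_utah_fire_relevant_py (post : List (String × String)) : Bool :=
  let text := PySem.Chars.lower
    (((PySem.Dict.mk post).getD "title" "").toList ++ ' ' :: ((PySem.Dict.mk post).getD "selftext" "").toList)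
  utahIndicators.any (fun loc => PySem.Chars.isIn loc text)

-- ===== PORT B =====
-- B's dispatch table _UTAH_BY_FIRST: first character ↦ indicator tails
def utahByFirst : PySem.Dict Char (List (List Char)) :=
  PySem.Dict.mk
    [('u', ["tah".toList, "tah county".toList]),
     ('s', ["alt lake".toList, "lc".toList, "andy".toList, "t. george".toList, "t george".toList]),
     ('p', ["rovo".toList]),
     ('o', ["gden".toList, "rem".toList]),
     ('w', ["est jordan".toList, "eber county".toList]),
     ('l', ["ayton".toList, "ehi".toList, "ogan".toList]),
     ('b', ["ountiful".toList]),
     ('d', ["raper".toList, "avis county".toList]),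
     ('m', ["urray".toList])]

-- for i, ch in enumerate(text): for rest in table.get(ch, ()): if text.startswith(rest, i+1): return True
-- (text[i+1:] is exactly the tail after the current character, so we recurse on the tail)
def utahDispatchScan : List Char → Bool
  | [] => false
  | ch :: t =>
    if (utahByFirst.getD ch []).any (fun rest => PySem.Chars.startswith t rest) then true
    else utahDispatchScan t

def is_utah_fire_relevant_py_alt (post : List (String × String)) : Bool :=
  utahDispatchScan (PySem.Chars.lower
    (((PySem.Dict.mk post).getD "title" "").toList ++ ' ' :: ((PySem.Dict.mk post).getD "selftext" "").toList))

-- ===== PRECONDITION & SPEC =====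
def Spec_is_utah_fire_relevant_py (post : List (String × String)) (out : Bool) : Prop := out = is_utah_fire_relevant_py_alt post
instance (post : List (String × String)) (out : Bool) : Decidable (Spec_is_utah_fire_relevant_py post out) := by unfold Spec_is_utah_fire_relevant_py; infer_instance

-- ===== CLAIM (what is proved, stated in full; the proofs are below) =====
def Claim_equal_is_utah_fire_relevant_py : Prop := ∀ (post : List (String × String)), Dom_is_utah_fire_relevant_py post → Spec_is_utah_fire_relevant_py post (is_utah_fire_relevant_py post)

-- ===== LEMMAS AND PROOFS =====

-- the table entry at ch holds exactly the tails of indicators starting with ch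
theorem utahByFirst_mem (ch : Char) (rest : List Char) :
    rest ∈ utahByFirst.getD ch [] ↔ (ch :: rest) ∈ utahIndicators := by
  by_cases h1 : ch = 'u'
  · subst h1; simp [utahByFirst, utahIndicators, PySem.Dict.getD, PySem.Dict.get?]
  by_cases h2 : ch = 's'
  · subst h2; simp [utahByFirst, utahIndicators, PySem.Dict.getD, PySem.Dict.get?]
  by_cases h3 : ch = 'p'
  · subst h3; simp [utahByFirst, utahIndicators, PySem.Dict.getD, PySem.Dict.get?]
  by_cases h4 : ch = 'o'
  · subst h4; simp [utahByFirst, utahIndicators, PySem.Dict.getD, PySem.Dict.get?]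
  by_cases h5 : ch = 'w'
  · subst h5; simp [utahByFirst, utahIndicators, PySem.Dict.getD, PySem.Dict.get?]
  by_cases h6 : ch = 'l'
  · subst h6; simp [utahByFirst, utahIndicators, PySem.Dict.getD, PySem.Dict.get?]
  by_cases h7 : ch = 'b'
  · subst h7; simp [utahByFirst, utahIndicators, PySem.Dict.getD, PySem.Dict.get?]
  by_cases h8 : ch = 'd'
  · subst h8; simp [utahByFirst, utahIndicators, PySem.Dict.getD, PySem.Dict.get?]
  by_cases h9 : ch = 'm'
  · subst h9; simp [utahByFirst, utahIndicators, PySem.Dict.getD, PySem.Dict.get?]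
  have f1 : ('u' == ch) = false := beq_eq_false_iff_ne.mpr (Ne.symm h1)
  have f2 : ('s' == ch) = false := beq_eq_false_iff_ne.mpr (Ne.symm h2)
  have f3 : ('p' == ch) = false := beq_eq_false_iff_ne.mpr (Ne.symm h3)
  have f4 : ('o' == ch) = false := beq_eq_false_iff_ne.mpr (Ne.symm h4)
  have f5 : ('w' == ch) = false := beq_eq_false_iff_ne.mpr (Ne.symm h5)
  have f6 : ('l' == ch) = false := beq_eq_false_iff_ne.mpr (Ne.symm h6)
  have f7 : ('b' == ch) = false := beq_eq_false_iff_ne.mpr (Ne.symm h7)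
  have f8 : ('d' == ch) = false := beq_eq_false_iff_ne.mpr (Ne.symm h8)
  have f9 : ('m' == ch) = false := beq_eq_false_iff_ne.mpr (Ne.symm h9)
  simp [utahByFirst, utahIndicators, PySem.Dict.getD, PySem.Dict.get?, List.find?, f1, f2, f3, f4, f5, f6, f7, f8, f9, h1, h2, h3, h4, h5, h6, h7, h8, h9]

-- B's dispatch scan succeeds iff some indicator is a prefix of some suffix
theorem utahDispatchScan_iff (s : List Char) :
    utahDispatchScan s = true ↔ ∃ loc ∈ utahIndicators, ∃ j, loc <+: s.drop j := by
  induction s with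
  | nil =>
      rw [utahDispatchScan]
      simp only [Bool.false_eq_true, false_iff]
      rintro ⟨loc, hmem, j, hp⟩
      rw [List.drop_nil] at hp
      rw [List.prefix_nil.mp hp] at hmem
      exact (by decide : ([] : List Char) ∉ utahIndicators) hmem
  | cons c t ih =>
      rw [utahDispatchScan]
      split_ifs with h
      · simp only [true_iff]
        rcases List.any_eq_true.1 h with ⟨rest, hrm, hsw⟩
        exact ⟨c :: rest, (utahByFirst_mem c rest).1 hrm, 0,
          by simpa using (PySem.Chars.startswith_iff _ _).1 hsw⟩
      · rw [ih]
        constructor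
        · rintro ⟨loc, hmem, j, hp⟩
          exact ⟨loc, hmem, j + 1, by simpa using hp⟩
        · rintro ⟨loc, hmem, j, hp⟩
          cases j with
          | zero =>
              exfalso
              cases loc with
              | nil => exact (by decide : ([] : List Char) ∉ utahIndicators) hmem
              | cons c' r =>
                  obtain ⟨he, hr⟩ := List.cons_prefix_cons.mp (by simpa using hp)
                  subst he
                  exact h (List.any_eq_true.2
                    ⟨r, (utahByFirst_mem c' r).2 hmem, (PySem.Chars.startswith_iff t r).2 hr⟩)
          | succ j => exact ⟨loc, hmem, j, by simpa using hp⟩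

-- A's per-indicator substring test succeeds iff the same condition holds
theorem utahAny_iff (s : List Char) :
    (utahIndicators.any (fun loc => PySem.Chars.isIn loc s)) = true ↔
      ∃ loc ∈ utahIndicators, ∃ j, loc <+: s.drop j := by
  simp only [List.any_eq_true]
  constructor
  · rintro ⟨loc, hmem, hin⟩
    rcases (PySem.Chars.exists_prefix_drop_iff_isIn loc s).2 hin with ⟨j, hj⟩
    exact ⟨loc, hmem, j, hj⟩
  · rintro ⟨loc, hmem, j, hj⟩
    exact ⟨loc, hmem, (PySem.Chars.exists_prefix_drop_iff_isIn loc s).1 ⟨j, hj⟩⟩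

-- ===== VERDICT (by name: the statement is the Claim_ definition above) =====
theorem is_utah_fire_relevant_py_spec : Claim_equal_is_utah_fire_relevant_py := by
  intro post _
  unfold Spec_is_utah_fire_relevant_py is_utah_fire_relevant_py is_utah_fire_relevant_py_alt
  have h := (utahAny_iff (PySem.Chars.lower
    (((PySem.Dict.mk post).getD "title" "").toList ++ ' ' :: ((PySem.Dict.mk post).getD "selftext" "").toList))).trans
    (utahDispatchScan_iff (PySem.Chars.lower
      (((PySem.Dict.mk post).getD "title" "").toList ++ ' ' :: ((PySem.Dict.mk post).getD "selftext" "").toList))).symm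
  exact Bool.coe_iff_coe.mp h
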